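-- pv_equiv track=rewrite | github.com/NeuroJSON/pyjdata | jdata/h5.py | soa2aos
-- ===== SOURCE A (Python) =====
-- from typing import Dict, Any, Tuple, Union, Optional, List
--
-- def soa2aos(starray: Dict) -> List[Dict]:
--     """
--     Convert a struct-of-arrays (SoA) to an array-of-structs (AoS)
--
--     author: Qianqian Fang (q.fang <at> neu.edu)
--
--     Args:
--         starray: a dictionary, with each subfield of numeric vectors
--
--     Returns:
--         as: a list of dictionaries, containing the same number of subfields as starray
--             with each subfield a single scalar
--
--     Example:
--         a = {'a': [1, 2], 'b': [3, 4]}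
--         st = soa2aos(a)
--
--     This file is part of JSNIRF specification: https://github.com/NeuroJSON/jsnirf
--
--     License: GPLv3 or Apache 2.0, see https://github.com/NeuroJSON/jsnirfy for details
--     """
--
--     if not isinstance(starray, dict):
--         raise ValueError("you must give a struct with subfield of numeric vectors")
--
--     # Get sizes of all fields
--     allsize = [
--         len(v) if hasattr(v, "__len__") and not isinstance(v, str) else 1
--         for v in starray.values()
--     ]
--
--     # If not all fields have the same size, return original
--     if len(set(allsize)) > 1 or not allsize:
--         return [starray] if allsize and allsize[0] == 1 else []
--
--     size = allsize[0]
--     if size <= 1: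
--         return [starray] if size == 1 else []
--
--     # Vectorized conversion using zip and dictionary comprehension
--     return [
--         {
--             k: (v[i] if hasattr(v, "__getitem__") and not isinstance(v, str) else v)
--             for k, v in starray.items()
--         }
--         for i in range(size)
--     ]
-- ===== SOURCE B (Python) =====
-- from typing import Dict, List
--
--
-- def soa2aos(starray: Dict) -> List[Dict]:
--     """Convert a struct-of-arrays to an array-of-structs by a field-major
--     transpose: build one column per field, then zip the columns into rows."""
--     if not isinstance(starray, dict):
--         raise ValueError("you must give a struct with subfield of numeric vectors")
--
--     allsize = [
--         len(v) if hasattr(v, "__len__") and not isinstance(v, str) else 1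
--         for v in starray.values()
--     ]
--
--     if len(set(allsize)) > 1 or not allsize:
--         return [starray] if allsize and allsize[0] == 1 else []
--
--     size = allsize[0]
--     if size <= 1:
--         return [starray] if size == 1 else []
--
--     keys = list(starray.keys())
--     columns = [
--         list(v[:size]) if hasattr(v, "__getitem__") and not isinstance(v, str)
--         else [v] * size
--         for v in starray.values()
--     ]
--     return [dict(zip(keys, row)) for row in zip(*columns)]
-- ===== Notes on version B (the rewrite author's own statement) =====
-- stated objective: alternative
-- what changed: A builds the result element-major (one dict per index i, scanning every field for each i); B builds it field-major: one column per field (v[:size]), then zip(*columns) transposes the columns into rows that are reassembled with dict(zip(keys, row)).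
-- outside the precondition, e.g. on soa2aos({'a': [1]}): A returns [{'a': [1]}], B returns [{'a': [1]}]
import Mathlib
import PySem

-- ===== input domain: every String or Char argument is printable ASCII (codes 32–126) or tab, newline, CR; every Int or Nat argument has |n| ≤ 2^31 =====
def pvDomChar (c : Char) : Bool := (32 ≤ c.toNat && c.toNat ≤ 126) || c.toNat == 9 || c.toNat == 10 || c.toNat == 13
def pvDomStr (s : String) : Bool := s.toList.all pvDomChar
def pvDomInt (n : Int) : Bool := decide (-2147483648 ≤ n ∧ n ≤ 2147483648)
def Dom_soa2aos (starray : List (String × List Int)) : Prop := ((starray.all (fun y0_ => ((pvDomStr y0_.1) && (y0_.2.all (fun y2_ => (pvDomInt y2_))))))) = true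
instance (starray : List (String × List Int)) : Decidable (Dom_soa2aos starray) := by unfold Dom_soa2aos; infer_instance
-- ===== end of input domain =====

-- B replaces A's element-major loop (build one dict per index i by scanning all fields)
-- with a field-major transpose (build one column per field, zip the columns into rows);
-- objective: alternative decomposition, same cost.

-- ===== PORT A =====
-- The degenerate branches in which Python A returns [starray] — a dict whose values are
-- still LISTS, not scalars of the declared element type — are excluded by Pre_soa2aos;
-- the port returns [] there (the value A returns in the sibling degenerate cases).
def soa2aos (starray : List (String × List Int)) : List (List (String × Int)) :=
  let d := PySem.Dict.ofList starray
  -- every value is a List Int: hasattr(v,'__len__')/'__getitem__' holds, isinstance(v,str) does not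
  let allsize : List Int := d.values.map (fun v => (v.length : Int))
  if 1 < (PySem.Set.ofList allsize).length ∨ allsize = [] then
    []
  else
    let size := allsize.headD 0
    if size ≤ 1 then
      []
    else
      -- [{k: v[i] for k, v in starray.items()} for i in range(size)]
      -- (i is always in range here: all values have length = size, 0 ≤ i < size)
      (PySem.List.pyRange 0 size 1).map (fun i =>
        (d.items.foldl (fun e kv => e.insert kv.1 (PySem.List.pyGetD kv.2 i 0))
          (PySem.Dict.empty : PySem.Dict String Int)).items)

-- ===== PORT B =====
-- zip(*columns): rows up to the length of the shortest column
def pyZipStar (cols : List (List Int)) : List (List Int) :=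
  let n := ((cols.map List.length).min?).getD 0
  (List.range n).map (fun i => cols.map (fun c => c.getD i 0))

-- one column per field: list(v[:size])
def soaColumns (d : PySem.Dict String (List Int)) (size : Int) : List (List Int) :=
  d.values.map (fun v => PySem.List.slice v none (some size))

def soa2aos_alt (starray : List (String × List Int)) : List (List (String × Int)) :=
  let d := PySem.Dict.ofList starray
  let allsize : List Int := d.values.map (fun v => (v.length : Int))
  if 1 < (PySem.Set.ofList allsize).length ∨ allsize = [] then
    []
  else
    let size := allsize.headD 0
    if size ≤ 1 then
      []
    else
      -- [dict(zip(keys, row)) for row in zip(*columns)]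
      (pyZipStar (soaColumns d size)).map (fun row =>
        (PySem.Dict.ofList (d.keys.zip row)).items)

-- ===== PRECONDITION & SPEC =====
-- Pre_ excludes the inputs on which Python A returns [starray]: a one-element list whose
-- entry still maps each key to a LIST, which is not a value of the declared return type
-- List (List (String × Int)).  That happens exactly when the FIRST value of the dict
-- exists and has length 1 (then either all sizes are 1, or the sizes are unequal with
-- allsize[0] == 1); both programs return that same out-of-type value there.
def Pre_soa2aos (starray : List (String × List Int)) : Prop :=
  ((PySem.Dict.ofList starray).values.map List.length).head? ≠ some 1
instance (starray : List (String × List Int)) : Decidable (Pre_soa2aos starray) := by unfold Pre_soa2aos; infer_instance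

def pvWitness_soa2aos : (List (String × List Int)) := [("a", [1, 2]), ("b", [3, 4])]

def Spec_soa2aos (starray : List (String × List Int)) (out : List (List (String × Int))) : Prop := out = soa2aos_alt starray
instance (starray : List (String × List Int)) (out : List (List (String × Int))) : Decidable (Spec_soa2aos starray out) := by unfold Spec_soa2aos; infer_instance

-- ===== CLAIM (what is proved, stated in full; the proofs are below) =====
def Claim_equal_soa2aos : Prop := ∀ (starray : List (String × List Int)), Dom_soa2aos starray → Pre_soa2aos starray → Spec_soa2aos starray (soa2aos starray)

-- ===== LEMMAS AND PROOFS =====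

theorem foldl_min_allsame {α : Type} [LinearOrder α] (t : List α) (s : α) (h : ∀ x ∈ t, x = s) : t.foldl min s = s := by
  induction t with
  | nil => rfl
  | cons b r ih =>
    have hb : b = s := h b (by simp)
    simp [hb, ih (fun x hx => h x (by simp [hx]))]

theorem min?_allsame {α : Type} [LinearOrder α] (l : List α) (s : α) (hne : l ≠ []) (h : ∀ x ∈ l, x = s) : l.min? = some s := by
  cases l with
  | nil => simp at hne
  | cons a t =>
    have ha : a = s := h a (by simp)
    rw [List.min?_cons', ha, foldl_min_allsame t s (fun x hx => h x (by simp [hx]))]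

theorem allsame_of_set_len_le_one (l : List Int) (s : Int) (hs : s ∈ l)
    (hlen : (PySem.Set.ofList l).length ≤ 1) : ∀ x ∈ l, x = s := by
  intro x hx
  have hxs : x ∈ PySem.Set.ofList l := (PySem.Set.mem_ofList _ _).2 hx
  have hss : s ∈ PySem.Set.ofList l := (PySem.Set.mem_ofList _ _).2 hs
  match hl : PySem.Set.ofList l with
  | [] => rw [hl] at hxs; simp at hxs
  | [z] => rw [hl] at hxs hss; simp at hxs hss; omega
  | _ :: _ :: _ => rw [hl] at hlen; simp at hlen

theorem items_ofList_of_nodup_keys {ν : Type} (l : List (String × ν)) (h : (l.map Prod.fst).Nodup) :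
    (PySem.Dict.ofList l).items = l := by
  show (l.foldl (fun d a => d.insert a.1 a.2) PySem.Dict.empty).items = l
  rw [PySem.Dict.items_foldl_insert_fresh l Prod.fst Prod.snd PySem.Dict.empty
    (fun a _ => PySem.Dict.contains_empty a.1) h]
  simp
  rfl

theorem main_eq (starray : List (String × List Int)) : soa2aos starray = soa2aos_alt starray := by
  unfold soa2aos soa2aos_alt
  set d := PySem.Dict.ofList starray with hd
  simp only []
  split_ifs with h1 h2
  · rfl
  · rfl
  · -- main branch
    rw [not_or, not_lt] at h1
    obtain ⟨hlen, hne⟩ := h1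
    set allsize : List Int := d.values.map (fun v => (v.length : Int)) with hallsize
    set size := allsize.headD 0 with hsize
    have hmem_head : size ∈ allsize := by
      cases hl : allsize with
      | nil => exact absurd hl hne
      | cons a t => rw [hsize, hl]; simp
    have hall : ∀ x ∈ allsize, x = size := allsame_of_set_len_le_one _ _ hmem_head hlen
    have hpos : 1 < size := by omega
    have hvlen : ∀ kv ∈ d.items, kv.2.length = size.toNat := by
      intro kv hkv
      have : ((kv.2.length : Int)) = size := by
        apply hall
        rw [hallsize]
        simp only [PySem.Dict.values]
        rw [List.map_map]
        exact List.mem_map_of_mem hkv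
      omega
    have hnd : d.keys.Nodup := PySem.Dict.nodup_keys_ofList starray
    -- RHS: columns = items.map (·.2)
    have hcols : soaColumns d size = d.items.map (fun kv => kv.2) := by
      unfold soaColumns
      simp only [PySem.Dict.values]
      rw [List.map_map]
      apply List.map_congr_left
      intro kv hkv
      simp only [Function.comp_apply]
      rw [PySem.List.slice_to _ (by omega)]
      exact List.take_of_length_le (by rw [hvlen kv hkv])
    have hne_items : d.items ≠ [] := by
      intro hc
      apply hne
      rw [hallsize]; simp only [PySem.Dict.values]; rw [hc]; simp
    have hmin : ((soaColumns d size).map List.length).min? = some size.toNat := by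
      rw [hcols, List.map_map]
      apply min?_allsame
      · simp [hne_items]
      · intro x hx
        obtain ⟨kv, hkv, rfl⟩ := List.mem_map.1 hx
        exact hvlen kv hkv
    -- both sides
    rw [PySem.List.pyRange_zero]
    unfold pyZipStar
    rw [hmin]
    simp only [Option.getD_some, List.map_map]
    apply List.map_congr_left
    intro j hj
    simp only [Function.comp_apply]
    rw [hcols]
    simp only [List.map_map]
    have hkeys : d.keys = List.map Prod.fst d.items := rfl
    rw [hkeys, List.zip_map']
    rw [PySem.Dict.items_foldl_insert_fresh d.items (fun kv => kv.1)
      (fun kv => PySem.List.pyGetD kv.2 (j : Int) 0) PySem.Dict.empty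
      (fun a _ => PySem.Dict.contains_empty a.1) hnd]
    refine Eq.trans ?_ (Eq.symm (items_ofList_of_nodup_keys _ (by rw [List.map_map]; exact hnd)))
    simp only [show (PySem.Dict.empty : PySem.Dict String Int).items = [] from rfl, List.nil_append]
    apply List.map_congr_left
    intro kv hkv
    simp [PySem.List.pyGetD_natCast]

-- ===== VERDICT (by name: the statement is the Claim_ definition above) =====
theorem soa2aos_spec : Claim_equal_soa2aos := by
  intro starray _ _
  unfold Spec_soa2aos
  exact main_eq starray
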